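-- pv_equiv track=rewrite | github.com/OranPie/Ferrython | tests/fixtures/test_phase19.py | while_else
-- ===== SOURCE A (Python) =====
-- def while_else(n):
--     i = 0
--     while i < n:
--         if i == 5:
--             return "break"
--         i += 1
--     else:
--         return "else"
-- ===== SOURCE B (Python) =====
-- def while_else(n):
--     return "break" if n > 5 else "else"
-- ===== Notes on version B (the rewrite author's own statement) =====
-- stated objective: simpler
-- what changed: Replaced the counting while/else loop with the closed-form conditional: the loop breaks out exactly when the counter can reach five, so B computes that one comparison directly.
import Mathlib
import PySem

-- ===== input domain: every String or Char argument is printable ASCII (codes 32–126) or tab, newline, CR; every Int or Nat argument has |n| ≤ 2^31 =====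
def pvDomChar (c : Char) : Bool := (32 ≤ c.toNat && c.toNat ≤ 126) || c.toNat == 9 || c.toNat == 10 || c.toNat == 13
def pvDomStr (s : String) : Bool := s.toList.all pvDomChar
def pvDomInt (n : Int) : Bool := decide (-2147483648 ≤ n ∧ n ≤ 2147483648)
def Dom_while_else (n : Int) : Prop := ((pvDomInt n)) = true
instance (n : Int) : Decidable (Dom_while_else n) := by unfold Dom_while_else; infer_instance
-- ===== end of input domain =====

-- B replaces the counting while/else loop by the closed-form conditional (simpler).

-- ===== PORT A =====
-- the while-loop of A: state is the counter i; exact when the loop terminates (i < n decreases n - i)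
def whileElseLoopA (n i : Int) : String :=
  if _h : i < n then
    if i = 5 then "break" else whileElseLoopA n (i + 1)
  else
    "else"
termination_by (n - i).toNat
decreasing_by omega

def while_else (n : Int) : String := whileElseLoopA n 0

-- ===== PORT B =====
def while_else_alt (n : Int) : String := if 5 < n then "break" else "else"

-- ===== PRECONDITION & SPEC =====
def Spec_while_else (n : Int) (out : String) : Prop := out = while_else_alt n
instance (n : Int) (out : String) : Decidable (Spec_while_else n out) := by unfold Spec_while_else; infer_instance

-- ===== CLAIM (what is proved, stated in full; the proofs are below) =====
def Claim_equal_while_else : Prop := ∀ (n : Int), Dom_while_else n → Spec_while_else n (while_else n)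

-- ===== LEMMAS AND PROOFS =====
theorem whileElseLoopA_eq (n i : Int) (h5 : i ≤ 5) :
    whileElseLoopA n i = if 5 < n then "break" else "else" := by
  by_cases h1 : i < n
  · rw [whileElseLoopA, dif_pos h1]
    by_cases h2 : i = 5
    · rw [if_pos h2, if_pos (by omega)]
    · rw [if_neg h2]
      exact whileElseLoopA_eq n (i + 1) (by omega)
  · rw [whileElseLoopA, dif_neg h1, if_neg (by omega)]
termination_by (5 - i).toNat
decreasing_by omega

-- ===== VERDICT (by name: the statement is the Claim_ definition above) =====
theorem while_else_spec : Claim_equal_while_else := by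
  intro n _
  unfold Spec_while_else while_else while_else_alt
  exact whileElseLoopA_eq n 0 (by omega)
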